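-- pv_equiv track=rewrite | github.com/worldwidelaw/legal-sources | sources/US/HI-Legislation/bootstrap.py | parse_section_path
-- ===== SOURCE A (Python) =====
-- def parse_section_path(path: str) -> dict:
--     """Extract division, title, chapter info from path."""
--     info = {"division": "", "title_num": "", "chapter": ""}
--     parts = path.split("/")
--     for i, part in enumerate(parts):
--         if part == "division" and i + 1 < len(parts):
--             info["division"] = parts[i + 1]
--         elif part == "title" and i + 1 < len(parts):
--             info["title_num"] = parts[i + 1]
--         elif part == "chapter" and i + 1 < len(parts):
--             info["chapter"] = parts[i + 1]
--     return info
-- ===== SOURCE B (Python) =====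
-- def parse_section_path(path: str) -> dict:
--     """Extract division, title, chapter info from path."""
--     parts = path.split("/")
--
--     def value_after(key):
--         # scan backwards so the FIRST hit is the last occurrence; the last
--         # element is never a key position (it has no successor)
--         for i in range(len(parts) - 2, -1, -1):
--             if parts[i] == key:
--                 return parts[i + 1]
--         return ""
--
--     return {"division": value_after("division"),
--             "title_num": value_after("title"),
--             "chapter": value_after("chapter")}
-- ===== Notes on version B (the rewrite author's own statement) =====
-- stated objective: alternative
-- what changed: Replaces A's single forward scan that mutates a result dict on three branches with three independent backward searches, each returning early at the last occurrence of its key.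
import Mathlib
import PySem

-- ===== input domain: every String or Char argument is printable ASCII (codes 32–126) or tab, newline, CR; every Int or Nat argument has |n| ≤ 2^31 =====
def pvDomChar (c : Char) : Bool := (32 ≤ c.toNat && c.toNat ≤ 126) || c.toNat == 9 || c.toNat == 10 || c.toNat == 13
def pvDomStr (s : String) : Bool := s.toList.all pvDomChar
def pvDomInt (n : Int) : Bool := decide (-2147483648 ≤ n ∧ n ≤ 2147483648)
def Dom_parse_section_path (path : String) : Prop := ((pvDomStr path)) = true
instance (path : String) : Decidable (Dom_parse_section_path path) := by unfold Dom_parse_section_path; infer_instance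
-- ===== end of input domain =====

-- B replaces A's forward scan with three independent backward searches (early return at
-- the last occurrence of each key) — an alternative traversal, same cost.


-- ===== PORT A =====
-- literal transliteration of A: an insertion-ordered dict with the three keys preset,
-- updated while scanning enumerate(parts); path.split("/") is Str.split? (some, since "/" ≠ "");
-- parts[i+1] is ported as pyGetD — exact, because the guard i + 1 < len(parts) keeps it in range.
def parse_section_path (path : String) : List (String × String) :=
  let info : PySem.Dict String String :=
    PySem.Dict.ofList [("division", ""), ("title_num", ""), ("chapter", "")]
  let parts := (PySem.Str.split? path "/").getD []
  let info := (PySem.List.enumerate parts 0).foldl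
    (fun info ip =>
      if ip.2 = "division" ∧ ip.1 + 1 < (parts.length : Int) then
        info.insert "division" (PySem.List.pyGetD parts (ip.1 + 1) "")
      else if ip.2 = "title" ∧ ip.1 + 1 < (parts.length : Int) then
        info.insert "title_num" (PySem.List.pyGetD parts (ip.1 + 1) "")
      else if ip.2 = "chapter" ∧ ip.1 + 1 < (parts.length : Int) then
        info.insert "chapter" (PySem.List.pyGetD parts (ip.1 + 1) "")
      else info)
    info
  info.items

-- ===== PORT B =====
-- literal transliteration of B: value_after's backward for-loop with early return is the
-- structural recursion valueAfterGo over range(len(parts)-2, -1, -1); the loop indices keep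
-- i and i + 1 in range, so pyGetD is exact for parts[i] and parts[i + 1].
def valueAfterGo (parts : List String) (key : String) : List Int → String
  | [] => ""
  | i :: rest =>
      if PySem.List.pyGetD parts i "" = key then PySem.List.pyGetD parts (i + 1) ""
      else valueAfterGo parts key rest

def parse_section_path_alt (path : String) : List (String × String) :=
  let parts := (PySem.Str.split? path "/").getD []
  let value_after := fun (key : String) =>
    valueAfterGo parts key (PySem.List.pyRange ((parts.length : Int) - 2) (-1) (-1))
  [("division", value_after "division"),
   ("title_num", value_after "title"),
   ("chapter", value_after "chapter")]

-- ===== PRECONDITION & SPEC =====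
def Spec_parse_section_path (path : String) (out : List (String × String)) : Prop := out = parse_section_path_alt path
instance (path : String) (out : List (String × String)) : Decidable (Spec_parse_section_path path out) := by unfold Spec_parse_section_path; infer_instance

-- ===== CLAIM (what is proved, stated in full; the proofs are below) =====
def Claim_equal_parse_section_path : Prop := ∀ (path : String), Dom_parse_section_path path → Spec_parse_section_path path (parse_section_path path)

-- ===== LEMMAS AND PROOFS =====

-- the value following the LAST occurrence of key k in a pair list, default d
def lastNext (L : List (String × String)) (k : String) (d : String) : String :=
  L.foldl (fun acc p => if p.1 = k then p.2 else acc) d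

-- the value at the FIRST occurrence of key k in a pair list, default d
def firstWinsD (L : List (String × String)) (k : String) (d : String) : String :=
  match L with
  | [] => d
  | p :: rest => if p.1 = k then p.2 else firstWinsD rest k d

theorem lastNext_cons (p : String × String) (L : List (String × String)) (k d : String) :
    lastNext (p :: L) k d = lastNext L k (if p.1 = k then p.2 else d) := by
  simp [lastNext, List.foldl_cons]

theorem firstWinsD_append_singleton (L : List (String × String)) (p : String × String)
    (k d : String) :
    firstWinsD (L ++ [p]) k d = firstWinsD L k (if p.1 = k then p.2 else d) := by
  induction L with
  | nil => simp [firstWinsD]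
  | cons q L ih => simp [firstWinsD, ih]

-- last-wins forward fold = first-wins on the reversed list
theorem lastNext_eq_firstWinsD_reverse (L : List (String × String)) (k d : String) :
    lastNext L k d = firstWinsD L.reverse k d := by
  induction L generalizing d with
  | nil => simp [lastNext, firstWinsD]
  | cons p L ih =>
      rw [lastNext_cons, ih, List.reverse_cons, firstWinsD_append_singleton]

-- the list of adjacent pairs, read off by index, is zip parts (tail parts)
theorem adj_pairs_eq (ps : List String) :
    (List.range (ps.length - 1)).map
      (fun j => (ps.getD j "", ps.getD (j + 1) "")) = ps.zip ps.tail := by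
  apply List.ext_getElem
  · simp [List.length_zip]
  · intro i h1 h2
    simp only [List.getElem_map, List.getElem_range, List.getElem_zip, List.getElem_tail]
    have hlen : i < ps.length - 1 := by simpa using h1
    rw [List.getD_eq_getElem ps "" (by omega), List.getD_eq_getElem ps "" (by omega)]

-- the index range mapped through adjacent gets is the zipped pair list
theorem map_idx_pairs (ps : List String) :
    (PySem.List.pyRange 0 ((ps.length : Int) - 1)).map
      (fun i => (PySem.List.pyGetD ps i "", PySem.List.pyGetD ps (i + 1) ""))
    = ps.zip ps.tail := by
  rw [← adj_pairs_eq ps, PySem.List.pyRange_one, List.map_map]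
  have hm : ((ps.length : Int) - 1 - 0).toNat = ps.length - 1 := by omega
  rw [hm]
  apply List.map_congr_left
  intro x _
  have h1 : (0 : Int) + (x : Int) = ((x : Nat) : Int) := by omega
  simp only [Function.comp, h1, PySem.List.pyGetD_natCast]
  have h2 : ((x : Nat) : Int) + 1 = (((x + 1 : Nat)) : Int) := by omega
  rw [h2, PySem.List.pyGetD_natCast]

-- any fold over the index range with adjacent gets is a fold over the zipped pairs
theorem foldl_idx_pairs {σ : Type} (ps : List String) (F : σ → String → String → σ) (s0 : σ) :
    (PySem.List.pyRange 0 ((ps.length : Int) - 1)).foldl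
      (fun s i => F s (PySem.List.pyGetD ps i "") (PySem.List.pyGetD ps (i + 1) "")) s0
    = (ps.zip ps.tail).foldl (fun s p => F s p.1 p.2) s0 := by
  rw [← map_idx_pairs ps, List.foldl_map]

-- A side: the three-branch fold over a pair list, from the literal three-key dict
theorem foldl_stepA3 (L : List (String × String)) (d t c : String) :
    (L.foldl
      (fun info p =>
        if p.1 = "division" then info.insert "division" p.2
        else if p.1 = "title" then info.insert "title_num" p.2
        else if p.1 = "chapter" then info.insert "chapter" p.2
        else info)
      (PySem.Dict.mk [("division", d), ("title_num", t), ("chapter", c)]))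
    = PySem.Dict.mk [("division", lastNext L "division" d),
                     ("title_num", lastNext L "title" t),
                     ("chapter", lastNext L "chapter" c)] := by
  induction L generalizing d t c with
  | nil => simp [lastNext]
  | cons p L ih =>
      rw [List.foldl_cons, lastNext_cons, lastNext_cons, lastNext_cons, ← ih]
      congr 1
      split_ifs <;> simp_all [PySem.Dict.insert]

-- A's scan computes lastNext of the zipped pairs for each of the three keys
theorem A_side (ps : List String) :
    ((PySem.List.enumerate ps 0).foldl
      (fun info ip =>
        if ip.2 = "division" ∧ ip.1 + 1 < (ps.length : Int) then
          info.insert "division" (PySem.List.pyGetD ps (ip.1 + 1) "")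
        else if ip.2 = "title" ∧ ip.1 + 1 < (ps.length : Int) then
          info.insert "title_num" (PySem.List.pyGetD ps (ip.1 + 1) "")
        else if ip.2 = "chapter" ∧ ip.1 + 1 < (ps.length : Int) then
          info.insert "chapter" (PySem.List.pyGetD ps (ip.1 + 1) "")
        else info)
      (PySem.Dict.mk [("division", ""), ("title_num", ""), ("chapter", "")]))
    = PySem.Dict.mk [("division", lastNext (ps.zip ps.tail) "division" ""),
                     ("title_num", lastNext (ps.zip ps.tail) "title" ""),
                     ("chapter", lastNext (ps.zip ps.tail) "chapter" "")] := by
  rw [PySem.List.enumerate_eq_map_pyRange ps "", List.foldl_map]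
  simp only [PySem.List.len_eq]
  rcases Nat.eq_zero_or_pos ps.length with h0 | hpos
  · rw [List.eq_nil_of_length_eq_zero h0]
    simp [lastNext]
  · have hsplit := PySem.List.pyRange_one_append 0 ((ps.length : Int) - 1) (ps.length : Int)
      (by omega) (by omega)
    have hsing : PySem.List.pyRange ((ps.length : Int) - 1) (ps.length : Int)
        = [(ps.length : Int) - 1] := by
      rw [← PySem.List.pyRange_one_singleton ((ps.length : Int) - 1)]
      congr 1
      ring
    rw [hsplit, hsing, List.foldl_append]
    rw [List.foldl_cons, List.foldl_nil]
    rw [if_neg (by simp), if_neg (by simp), if_neg (by simp)]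
    have hcongr : ∀ (acc : PySem.Dict String String) (j : Int),
        j ∈ PySem.List.pyRange 0 ((ps.length : Int) - 1) →
        (if PySem.List.pyGetD ps j "" = "division" ∧ j + 1 < (ps.length : Int) then
          acc.insert "division" (PySem.List.pyGetD ps (j + 1) "")
        else if PySem.List.pyGetD ps j "" = "title" ∧ j + 1 < (ps.length : Int) then
          acc.insert "title_num" (PySem.List.pyGetD ps (j + 1) "")
        else if PySem.List.pyGetD ps j "" = "chapter" ∧ j + 1 < (ps.length : Int) then
          acc.insert "chapter" (PySem.List.pyGetD ps (j + 1) "")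
        else acc)
        = (fun (s : PySem.Dict String String) a b =>
            if a = "division" then s.insert "division" b
            else if a = "title" then s.insert "title_num" b
            else if a = "chapter" then s.insert "chapter" b
            else s) acc (PySem.List.pyGetD ps j "") (PySem.List.pyGetD ps (j + 1) "") := by
      intro acc j hj
      rw [PySem.List.mem_pyRange_one] at hj
      have hlt : j + 1 < (ps.length : Int) := by omega
      simp only [hlt, and_true]
    rw [PySem.List.foldl_congr_mem _ _ _ _ hcongr]
    have h := foldl_idx_pairs ps
      (fun (s : PySem.Dict String String) a b =>
        if a = "division" then s.insert "division" b
        else if a = "title" then s.insert "title_num" b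
        else if a = "chapter" then s.insert "chapter" b
        else s)
      (PySem.Dict.mk [("division", ""), ("title_num", ""), ("chapter", "")])
    simp only at h
    rw [h, foldl_stepA3]

-- B helper: the backward loop is firstWinsD over the index list mapped to adjacent pairs
theorem valueAfterGo_eq_firstWinsD (ps : List String) (k : String) (idxs : List Int) :
    valueAfterGo ps k idxs
      = firstWinsD (idxs.map
          (fun i => (PySem.List.pyGetD ps i "", PySem.List.pyGetD ps (i + 1) ""))) k "" := by
  induction idxs with
  | nil => simp [valueAfterGo, firstWinsD]
  | cons i rest ih => simp [valueAfterGo, firstWinsD, ih]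

-- B side: each backward search computes lastNext of the zipped pairs
theorem B_side (ps : List String) (k : String) :
    valueAfterGo ps k (PySem.List.pyRange ((ps.length : Int) - 2) (-1) (-1))
    = lastNext (ps.zip ps.tail) k "" := by
  rw [valueAfterGo_eq_firstWinsD, lastNext_eq_firstWinsD_reverse]
  congr 1
  have hr : PySem.List.pyRange ((ps.length : Int) - 2) (-1) (-1)
      = (PySem.List.pyRange 0 ((ps.length : Int) - 1)).reverse := by
    rw [PySem.List.pyRange_neg_one_eq_reverse]
    congr 2
    omega
  rw [hr, List.map_reverse, map_idx_pairs]

-- ===== VERDICT (by name: the statement is the Claim_ definition above) =====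
theorem parse_section_path_spec : Claim_equal_parse_section_path := by
  intro path _
  unfold Spec_parse_section_path parse_section_path parse_section_path_alt
  dsimp only
  rw [show PySem.Dict.ofList [("division", ""), ("title_num", ""), ("chapter", "")]
      = PySem.Dict.mk [("division", ""), ("title_num", ""), ("chapter", "")] from rfl]
  rw [A_side, B_side, B_side, B_side]
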